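-- pv_equiv track=rewrite | github.com/piyush-daga/advent-of-code | 2022/day6/main.py | first_occurrence_of_non_repeats
-- ===== SOURCE A (Python) =====
-- from collections import Counter
--
-- def first_occurrence_of_non_repeats(data: str):
--     result = 0
--     for i, d in enumerate(data):
--         # For first part
--         # c = Counter(data[i: i+4])
--         # For second part
--         c = Counter(data[i: i+14])
--         val = c.most_common(1)[0][1]
--         if  val == 1:
--             result = i
--             break
--
--     return result
-- ===== SOURCE B (Python) =====
-- from collections import Counter
--
-- def first_occurrence_of_non_repeats(data: str):
--     # Sliding window: one Counter maintained incrementally instead of rebuilding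
--     # (and sorting) a Counter for every index.
--     n = len(data)
--     c = Counter(data[:14])
--     distinct = len(c)
--     for i, ch in enumerate(data):
--         if distinct == min(14, n - i):
--             return i
--         c[ch] -= 1
--         if c[ch] == 0:
--             distinct -= 1
--         j = i + 14
--         if j < n:
--             if c[data[j]] == 0:
--                 distinct += 1
--             c[data[j]] += 1
--     return 0
-- ===== Notes on version B (the rewrite author's own statement) =====
-- stated objective: faster
-- what changed: Instead of rebuilding and sorting a Counter of the 14-char slice at every index, B maintains one Counter and a distinct-key count incrementally across the sliding window and compares the distinct count with the window length.
import Mathlib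
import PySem

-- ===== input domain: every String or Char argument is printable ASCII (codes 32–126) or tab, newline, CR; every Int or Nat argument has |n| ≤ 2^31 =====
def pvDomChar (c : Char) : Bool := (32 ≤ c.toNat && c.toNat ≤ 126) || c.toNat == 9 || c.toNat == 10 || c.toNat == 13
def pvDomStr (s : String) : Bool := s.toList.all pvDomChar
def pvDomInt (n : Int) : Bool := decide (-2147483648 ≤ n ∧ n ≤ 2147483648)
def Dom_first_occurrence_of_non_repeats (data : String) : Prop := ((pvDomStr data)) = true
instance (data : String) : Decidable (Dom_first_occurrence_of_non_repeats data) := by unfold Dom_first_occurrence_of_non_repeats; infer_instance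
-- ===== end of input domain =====

-- B replaces A's per-index Counter rebuild (plus most_common sort) by one Counter and a
-- distinct-key count maintained incrementally across the sliding window (objective: faster).

-- ===== PORT A =====
-- the loop 'for i, d in enumerate(data): c = Counter(data[i:i+14]); val = c.most_common(1)[0][1]; if val == 1: result = i; break'
def pvAGo (cs : List Char) : List (Int × Char) → Int
  | [] => 0
  | (i, _d) :: rest =>
    let c := PySem.Dict.counter (PySem.List.slice cs (some i) (some (i + 14)))
    -- most_common(1) = first element of the items sorted by count, descending (stable)
    let mc := (PySem.List.sorted c.items (fun p => p.2) true).take 1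
    -- mc[0][1]; the 'none' arm is Python's IndexError, unreachable: the slice is nonempty for every i of enumerate(data)
    match PySem.List.pyGet? mc 0 with
    | some p => if p.2 = 1 then i else pvAGo cs rest
    | none => 0

def first_occurrence_of_non_repeats (data : String) : Int :=
  pvAGo data.toList (PySem.List.enumerate data.toList 0)

-- ===== PORT B =====
-- the loop of Source B: one sliding counter c and the maintained distinct-key count
def pvBGo (cs : List Char) (n : Int) : List Char → Int → PySem.Dict Char Int → Int → Int
  | [], _, _, _ => 0
  | ch :: rest, i, c, distinct =>
    if distinct = min 14 (n - i) then i
    else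
      let c1 := c.modify ch 0 (· - 1)
      let distinct1 := if c1.getD ch 0 = 0 then distinct - 1 else distinct
      if i + 14 < n then
        let a := PySem.List.pyGetD cs (i + 14) ' '   -- data[j]; j is always in range here
        let distinct2 := if c1.getD a 0 = 0 then distinct1 + 1 else distinct1
        pvBGo cs n rest (i + 1) (c1.modify a 0 (· + 1)) distinct2
      else
        pvBGo cs n rest (i + 1) c1 distinct1

def first_occurrence_of_non_repeats_alt (data : String) : Int :=
  let cs := data.toList
  let n : Int := cs.length
  let c := PySem.Dict.counter (PySem.List.slice cs none (some 14))
  pvBGo cs n cs 0 c (c.size : Int)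

-- ===== PRECONDITION & SPEC =====
def Spec_first_occurrence_of_non_repeats (data : String) (out : Int) : Prop := out = first_occurrence_of_non_repeats_alt data
instance (data : String) (out : Int) : Decidable (Spec_first_occurrence_of_non_repeats data out) := by unfold Spec_first_occurrence_of_non_repeats; infer_instance

-- ===== CLAIM (what is proved, stated in full; the proofs are below) =====
def Claim_equal_first_occurrence_of_non_repeats : Prop := ∀ (data : String), Dom_first_occurrence_of_non_repeats data → Spec_first_occurrence_of_non_repeats data (first_occurrence_of_non_repeats data)

-- ===== LEMMAS AND PROOFS =====

-- reference: first index m with the 14-char window at m all-distinct, else 0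
def pvFind (cs : List Char) : List Char → Nat → Int
  | [], _ => 0
  | _ :: rest, m => if ((cs.drop m).take 14).Nodup then (m : Int) else pvFind cs rest (m + 1)

-- number of distinct elements = length iff Nodup
theorem pv_card_toFinset_eq_length_iff (w : List Char) :
    w.toFinset.card = w.length ↔ w.Nodup := by
  rw [List.card_toFinset]
  constructor
  · intro h
    have hs := List.dedup_sublist w
    have := hs.eq_of_length h
    rw [← this]; exact List.nodup_dedup w
  · intro h; rw [List.dedup_eq_self.mpr h]

-- the distinct count of Counter(w)
theorem pv_size_counter (w : List Char) :
    ((PySem.Dict.counter w).size : Int) = (w.toFinset.card : Int) := by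
  have h1 : (PySem.Dict.counter w).size = (PySem.Dict.counter w).items.length := rfl
  rw [h1, PySem.Dict.items_counter, List.length_map]
  have hperm : (PySem.Set.ofList w).Perm w.dedup := by
    rw [List.perm_ext_iff_of_nodup (PySem.Set.nodup_ofList w) (List.nodup_dedup w)]
    intro a
    rw [PySem.Set.mem_ofList, List.mem_dedup]
  rw [hperm.length_eq, List.card_toFinset]

-- the most_common(1)[0][1] value of Counter(w) is 1 iff w has no repeats
theorem pv_aVal (w : List Char) (hw : w ≠ []) :
    ∃ p : Char × Int,
      PySem.List.pyGet? ((PySem.List.sorted (PySem.Dict.counter w).items (fun p => p.2) true).take 1) 0 = some p ∧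
      (p.2 = 1 ↔ w.Nodup) := by
  have hitems : (PySem.Dict.counter w).items
      = (PySem.Set.ofList w).map (fun k => (k, (w.count k : Int))) := by
    simpa using PySem.Dict.items_counter w
  have hne : (PySem.Dict.counter w).items ≠ [] := by
    rw [hitems]
    intro h
    obtain ⟨x, hx⟩ := List.exists_mem_of_ne_nil w hw
    have : x ∈ PySem.Set.ofList w := (PySem.Set.mem_ofList w x).mpr hx
    simp [List.map_eq_nil_iff] at h
    rw [h] at this; simp at this
  obtain ⟨m, t, hs⟩ : ∃ m t, PySem.List.sorted (PySem.Dict.counter w).items (fun p => p.2) true = m :: t := by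
    cases hsl : PySem.List.sorted (PySem.Dict.counter w).items (fun p => p.2) true with
    | nil => exact absurd ((PySem.List.sorted_eq_nil_iff _ _ _).mp hsl) hne
    | cons m t => exact ⟨m, t, rfl⟩
  refine ⟨m, ?_, ?_⟩
  · rw [hs]; simp [PySem.List.pyGet?, PySem.List.pyIdx?]
  · have hmax : ∀ y ∈ (PySem.Dict.counter w).items, y.2 ≤ m.2 :=
      PySem.List.key_head_sorted_rev_ge _ _ hs
    have hmem : m ∈ (PySem.Dict.counter w).items :=
      (PySem.List.sorted_perm (PySem.Dict.counter w).items (fun p => p.2) true).mem_iff.mp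
        (by rw [hs]; exact List.mem_cons_self ..)
    rw [hitems] at hmem hmax
    obtain ⟨k, hk, hkm⟩ := List.mem_map.mp hmem
    have hkw : k ∈ w := (PySem.Set.mem_ofList w k).mp hk
    constructor
    · intro h1
      rw [List.nodup_iff_count_le_one]
      intro a
      by_cases ha : a ∈ w
      · have : ((w.count a : Int)) ≤ m.2 :=
          hmax (a, (w.count a : Int)) (List.mem_map.mpr ⟨a, (PySem.Set.mem_ofList w a).mpr ha, rfl⟩)
        rw [h1] at this
        exact_mod_cast this
      · simp [List.count_eq_zero_of_not_mem ha]
    · intro hnd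
      have : w.count k = 1 := List.count_eq_one_of_mem hnd hkw
      rw [← hkm]; simp [this]

-- loop A computes pvFind
theorem pv_aGo_eq (cs : List Char) (l : List Char) (m : Nat) (hl : cs.drop m = l) :
    pvAGo cs (PySem.List.enumerate l (m : Int)) = pvFind cs l m := by
  induction l generalizing m with
  | nil => simp [PySem.List.enumerate, pvAGo, pvFind]
  | cons d rest ih =>
    rw [PySem.List.enumerate_cons]
    have hsl : PySem.List.slice cs (some (m : Int)) (some ((m : Int) + 14)) = (cs.drop m).take 14 := by
      simpa using PySem.List.slice_natCast_add cs m 14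
    have hw : (cs.drop m).take 14 ≠ [] := by rw [hl]; simp
    obtain ⟨p, hp, hiff⟩ := pv_aVal _ hw
    have hdrop : cs.drop (m + 1) = rest := by
      rw [← List.tail_drop, hl]; rfl
    simp only [pvAGo, pvFind, hsl, hp]
    split_ifs with h1 h2 h2
    · rfl
    · exact absurd (hiff.mp h1) h2
    · exact absurd (hiff.mpr h2) h1
    · have := ih (m + 1) hdrop
      rw [← this]; norm_num

-- loop B computes pvFind
theorem pv_bGo_eq (cs : List Char) (l : List Char) (m : Nat) (c : PySem.Dict Char Int) (distinct : Int)
    (hl : cs.drop m = l)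
    (hc : ∀ x, c.getD x 0 = (((cs.drop m).take 14).count x : Int))
    (hd : distinct = (((cs.drop m).take 14).toFinset.card : Int)) :
    pvBGo cs (cs.length : Int) l (m : Int) c distinct = pvFind cs l m := by
  induction l generalizing m c distinct with
  | nil => simp [pvBGo, pvFind]
  | cons ch rest ih =>
    have hml : m < cs.length := by
      by_contra h
      rw [List.drop_eq_nil_of_le (by omega)] at hl
      simp at hl
    have hdrop : cs.drop (m + 1) = rest := by rw [← List.tail_drop, hl]; rfl
    have hw : (cs.drop m).take 14 = ch :: rest.take 13 := by rw [hl]; rfl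
    have hwlen : ((cs.drop m).take 14).length = min 14 (cs.length - m) := by
      simp [List.length_take, List.length_drop]
    -- the loop test is the Nodup test
    have hcond : (distinct = min 14 ((cs.length : Int) - (m : Int))) ↔ ((cs.drop m).take 14).Nodup := by
      rw [hd, ← pv_card_toFinset_eq_length_iff, hwlen]
      constructor
      · intro h; omega
      · intro h; omega
    -- invariant after dropping ch
    set t := rest.take 13 with ht
    have hc1 : ∀ x, (c.modify ch 0 (· - 1)).getD x 0 = (t.count x : Int) := by
      intro x
      rw [PySem.Dict.getD_modify]
      by_cases hx : x = ch
      · subst hx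
        rw [if_pos rfl, hc x, hw]
        simp
      · rw [if_neg hx, hc x, hw]
        have hne : ¬ch = x := fun h => hx h.symm
        simp [hne]
    have hwt : ((cs.drop m).take 14).toFinset = insert ch t.toFinset := by rw [hw]; simp
    have hd1 : (if (c.modify ch 0 (· - 1)).getD ch 0 = 0 then distinct - 1 else distinct)
        = (t.toFinset.card : Int) := by
      rw [hc1 ch, hd, hwt]
      by_cases hch : ch ∈ t
      · rw [if_neg (by simpa [List.count_eq_zero] using hch),
            Finset.insert_eq_self.mpr (List.mem_toFinset.mpr hch)]
      · rw [if_pos (by simpa [List.count_eq_zero] using hch),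
            Finset.card_insert_of_notMem (by simpa [List.mem_toFinset] using hch)]
        push_cast; ring
    by_cases hnod : ((cs.drop m).take 14).Nodup
    · simp only [pvBGo, pvFind, if_pos (hcond.mpr hnod), if_pos hnod]
    · rw [show pvFind cs (ch :: rest) m = pvFind cs rest (m + 1) by
        simp only [pvFind, if_neg hnod]]
      by_cases hlt : (m : Int) + 14 < (cs.length : Int)
      · -- full slide: drop ch, add cs[m+14]
        have hmn : m + 14 < cs.length := by omega
        have hrlen : 13 < rest.length := by
          have := congrArg List.length hdrop
          simp [List.length_drop] at this; omega
        have haidx : PySem.List.pyGetD cs ((m : Int) + 14) ' ' = cs[m + 14] := by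
          rw [show ((m : Nat) : Int) + 14 = ((m + 14 : Nat) : Int) by push_cast; ring,
              PySem.List.pyGetD_natCast, List.getD_eq_getElem cs ' ' hmn]
        have h14 : List.take 14 rest = List.take 13 rest ++ rest[13]?.toList := by
          have h := List.take_add_one (l := rest) (i := 13)
          norm_num at h
          exact h
        have hrg : rest[13]? = some cs[m + 14] := by
          have h1 : rest[13]? = cs[m + 1 + 13]? := by rw [← hdrop, List.getElem?_drop]
          simp only [Nat.add_assoc] at h1
          norm_num at h1
          rw [h1]
          exact List.getElem?_eq_getElem hmn
        have hw' : (cs.drop (m + 1)).take 14 = t ++ [cs[m + 14]] := by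
          rw [hdrop, h14, hrg, ht]
          rfl
        simp only [pvBGo, if_neg (fun h => hnod (hcond.mp h)), if_pos hlt]
        have hgoal := ih (m + 1)
          ((c.modify ch 0 (· - 1)).modify (PySem.List.pyGetD cs ((m : Int) + 14) ' ') 0 (· + 1))
          (if (c.modify ch 0 (· - 1)).getD (PySem.List.pyGetD cs ((m : Int) + 14) ' ') 0 = 0
            then (if (c.modify ch 0 (· - 1)).getD ch 0 = 0 then distinct - 1 else distinct) + 1
            else (if (c.modify ch 0 (· - 1)).getD ch 0 = 0 then distinct - 1 else distinct))
          hdrop ?_ ?_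
        · rw [← hgoal]
          norm_num
        · intro x
          rw [PySem.Dict.getD_modify, haidx, hw', List.count_append]
          by_cases hx : x = cs[m + 14]
          · subst hx
            rw [if_pos rfl, hc1 (cs[m + 14])]
            push_cast
            simp
          · rw [if_neg hx, hc1 x]
            have hne : ¬cs[m + 14] = x := fun h => hx h.symm
            simp [hne]
        · rw [haidx, hc1, hd1, hw']
          have htf : (t ++ [cs[m + 14]]).toFinset = insert cs[m + 14] t.toFinset := by
            simp [List.toFinset_append]
          rw [htf]
          by_cases hmem : cs[m + 14] ∈ t
          · rw [if_neg (by simpa [List.count_eq_zero] using hmem),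
                Finset.insert_eq_self.mpr (List.mem_toFinset.mpr hmem)]
          · rw [if_pos (by simpa [List.count_eq_zero] using hmem),
                Finset.card_insert_of_notMem (by simpa [List.mem_toFinset] using hmem)]
            push_cast; ring
      · -- tail shrink: no element added
        have hmn : cs.length ≤ m + 14 := by omega
        have hrlen : rest.length ≤ 13 := by
          have := congrArg List.length hdrop
          simp [List.length_drop] at this; omega
        have hw' : (cs.drop (m + 1)).take 14 = t := by
          rw [hdrop, ht, List.take_of_length_le (by omega), List.take_of_length_le hrlen]
        simp only [pvBGo, if_neg (fun h => hnod (hcond.mp h)), if_neg hlt]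
        have hgoal := ih (m + 1) (c.modify ch 0 (· - 1))
          (if (c.modify ch 0 (· - 1)).getD ch 0 = 0 then distinct - 1 else distinct)
          hdrop (by rw [hw']; exact hc1) (by rw [hw', hd1])
        rw [← hgoal]
        norm_num

-- ===== VERDICT (by name: the statement is the Claim_ definition above) =====
theorem first_occurrence_of_non_repeats_spec : Claim_equal_first_occurrence_of_non_repeats := by
  intro data _
  unfold Spec_first_occurrence_of_non_repeats
  unfold first_occurrence_of_non_repeats first_occurrence_of_non_repeats_alt
  have hsl : PySem.List.slice data.toList none (some 14) = data.toList.take 14 := by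
    simpa using PySem.List.slice_to_natCast data.toList 14
  have h1 := pv_aGo_eq data.toList data.toList 0 (by simp)
  have h2 := pv_bGo_eq data.toList data.toList 0
      (PySem.Dict.counter (PySem.List.slice data.toList none (some 14)))
      ((PySem.Dict.counter (PySem.List.slice data.toList none (some 14))).size : Int)
      (by simp)
      (by intro x; rw [hsl, PySem.Dict.getD_counter]; simp)
      (by rw [hsl, pv_size_counter]; simp)
  simpa using h1.trans h2.symm
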